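-- pv_equiv track=rewrite | github.com/Secbrain/CMD | flash_processing/test.py | CalculateStr
-- ===== SOURCE A (Python) =====
-- def CalculateStr(str):
--     result = 0
--     i = 0
--     maxlength = len(str)
--     while i < maxlength:
--         result += int(str[i],16) * pow(256, i)
--         i += 1
--     return result
-- ===== SOURCE B (Python) =====
-- def CalculateStr(str):
--     digits = [int(c, 16) for c in str]
--     def val(lo, hi):
--         n = hi - lo
--         if n == 0:
--             return 0
--         if n == 1:
--             return digits[lo]
--         mid = (lo + hi) // 2
--         return val(lo, mid) + val(mid, hi) * (256 ** (mid - lo))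
--     return val(0, len(digits))
-- ===== Notes on version B (the rewrite author's own statement) =====
-- stated objective: faster
-- what changed: Replaces A's linear index loop that recomputes pow(256,i) and adds one full-width bignum per character by a balanced divide-and-conquer: split the digit segment in half, combine the two halves with a single shift-by-256^(half) multiply, giving subquadratic bignum work.
import Mathlib
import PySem

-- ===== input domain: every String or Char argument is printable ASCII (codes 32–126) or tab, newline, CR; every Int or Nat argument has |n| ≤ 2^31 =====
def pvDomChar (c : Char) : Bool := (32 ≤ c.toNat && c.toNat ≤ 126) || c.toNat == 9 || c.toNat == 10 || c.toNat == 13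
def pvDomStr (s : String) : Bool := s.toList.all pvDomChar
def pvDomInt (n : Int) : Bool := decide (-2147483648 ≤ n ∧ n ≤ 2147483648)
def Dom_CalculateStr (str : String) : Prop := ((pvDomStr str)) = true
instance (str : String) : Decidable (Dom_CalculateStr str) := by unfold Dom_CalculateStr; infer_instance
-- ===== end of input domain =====

-- B replaces A's pow(256,i)-per-step index loop by a balanced divide-and-conquer combine (faster; return value only).


-- int(c, 16) on a one-character string (digit primitive of both ports; exact per PySem)
def pvHexDigit (c : Char) : Int := (PySem.Int.ofCharsBase? [c] 16).getD 0

-- ===== PORT A =====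
-- the while loop: state (i, result); str[i] via list indexing (i is always in range inside the loop)
def CalculateStrLoop (cs : List Char) (maxlength i : Nat) (result : Int) : Int :=
  if i < maxlength then
    CalculateStrLoop cs maxlength (i + 1) (result + pvHexDigit (cs.getD i ' ') * 256 ^ i)
  else result
termination_by maxlength - i

def CalculateStr (str : String) : Int :=
  CalculateStrLoop str.toList str.toList.length 0 0

-- ===== PORT B =====
-- the inner recursion val(lo, hi) of Source B: split the digit segment at mid, combine with one shift multiply
def CalculateStrVal (digits : List Int) (lo hi : Nat) : Int :=
  if _h0 : hi - lo = 0 then 0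
  else if _h1 : hi - lo = 1 then digits.getD lo 0
  else
    CalculateStrVal digits lo ((lo + hi) / 2)
      + CalculateStrVal digits ((lo + hi) / 2) hi * 256 ^ ((lo + hi) / 2 - lo)
termination_by hi - lo
decreasing_by all_goals omega

def CalculateStr_alt (str : String) : Int :=
  CalculateStrVal (str.toList.map pvHexDigit) 0 (str.toList.map pvHexDigit).length

-- ===== PRECONDITION & SPEC =====
-- Pre_ excludes exactly the inputs where Python A raises ValueError: a character that is not a hex digit.
def Pre_CalculateStr (str : String) : Prop :=
  str.toList.all (fun c => ('0' ≤ c ∧ c ≤ '9') ∨ ('a' ≤ c ∧ c ≤ 'f') ∨ ('A' ≤ c ∧ c ≤ 'F')) = true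
instance (str : String) : Decidable (Pre_CalculateStr str) := by unfold Pre_CalculateStr; infer_instance
def pvWitness_CalculateStr : String := "1aF0"

def Spec_CalculateStr (str : String) (out : Int) : Prop := out = CalculateStr_alt str
instance (str : String) (out : Int) : Decidable (Spec_CalculateStr str out) := by unfold Spec_CalculateStr; infer_instance

-- ===== CLAIM (what is proved, stated in full; the proofs are below) =====
def Claim_equal_CalculateStr : Prop := ∀ (str : String), Dom_CalculateStr str → Pre_CalculateStr str → Spec_CalculateStr str (CalculateStr str)

-- ===== LEMMAS AND PROOFS =====
-- the common specification: little-endian base-256 Horner value of a digit list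
def pvH (l : List Int) : Int := l.foldr (fun d acc => d + 256 * acc) 0

lemma pvH_append (l1 l2 : List Int) : pvH (l1 ++ l2) = pvH l1 + 256 ^ l1.length * pvH l2 := by
  induction l1 with
  | nil => simp [pvH]
  | cons d l ih => simp [pvH, List.foldr_cons] at ih ⊢; rw [ih]; ring

lemma loop_eq (cs : List Char) (i : Nat) (result : Int) :
    CalculateStrLoop cs cs.length i result
      = result + 256 ^ i * pvH ((cs.drop i).map pvHexDigit) := by
  by_cases h : i < cs.length
  · rw [CalculateStrLoop, if_pos h, loop_eq cs (i + 1)]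
    rw [List.drop_eq_getElem_cons h, List.getD_eq_getElem cs ' ' h,
       List.map_cons]
    simp only [pvH, List.foldr_cons, pow_succ]
    ring
  · rw [CalculateStrLoop, if_neg h, List.drop_eq_nil_of_le (Nat.le_of_not_lt h)]
    simp [pvH]
termination_by cs.length - i

lemma val_eq (digits : List Int) (lo hi : Nat) (hle : lo ≤ hi) (hhi : hi ≤ digits.length) :
    CalculateStrVal digits lo hi = pvH ((digits.drop lo).take (hi - lo)) := by
  rw [CalculateStrVal]
  split_ifs with h0 h1
  · rw [h0]; simp [pvH]
  · have hlt : lo < digits.length := by omega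
    rw [h1, List.take_one, List.head?_drop, List.getElem?_eq_getElem hlt]
    simp [pvH, List.getElem?_eq_getElem hlt]
  · set mid := (lo + hi) / 2 with hmid
    have h1 : lo < mid := by omega
    have h2 : mid < hi := by omega
    rw [val_eq digits lo mid (by omega) (by omega),
        val_eq digits mid hi (by omega) hhi]
    have hsplit : hi - lo = (mid - lo) + (hi - mid) := by omega
    rw [hsplit, List.take_add, pvH_append, List.drop_drop]
    have : lo + (mid - lo) = mid := by omega
    rw [this]
    have hlen : ((digits.drop lo).take (mid - lo)).length = mid - lo := by
      simp; omega
    rw [hlen]; ring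
termination_by hi - lo
decreasing_by all_goals omega

-- ===== VERDICT (by name: the statement is the Claim_ definition above) =====
theorem CalculateStr_spec : Claim_equal_CalculateStr := by
  intro str _ _
  show CalculateStr str = CalculateStr_alt str
  rw [CalculateStr, CalculateStr_alt, loop_eq,
      val_eq _ 0 _ (Nat.zero_le _) (le_refl _)]
  simp [List.take_of_length_le]
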